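-- pv_equiv track=rewrite | github.com/m-aouzal/dsomm | app/preprocessing/preprocess.py | generate_level_activities
-- ===== SOURCE A (Python) =====
-- def generate_level_activities(dsomm_data):
--     """
--     Generate a mapping of levels to activities, preserving all fields.
--     """
--     level_activities = {}
--     for entry in dsomm_data:
--         try:
--             level = int(entry.get("Level", 0))
--         except ValueError:
--             level = 0  # Default level if conversion fails
--         if level not in level_activities:
--             level_activities[level] = []
--         level_activities[level].append(entry)
--     return level_activities
-- ===== SOURCE B (Python) =====
-- def generate_level_activities(dsomm_data):
--     """
--     Generate a mapping of levels to activities, preserving all fields.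
--     Recursive partition: peel off the first entry's level, split the list
--     into that level's group and the rest, recurse on the rest.
--     """
--     def _level(entry):
--         try:
--             return int(entry.get("Level", 0))
--         except ValueError:
--             return 0
--
--     def go(entries):
--         if not entries:
--             return {}
--         l = _level(entries[0])
--         result = {l: [e for e in entries if _level(e) == l]}
--         result.update(go([e for e in entries if _level(e) != l]))
--         return result
--
--     return go(dsomm_data)
-- ===== Notes on version B (the rewrite author's own statement) =====
-- stated objective: alternative
-- what changed: Replaces the incremental dict-grouping loop (membership test + in-place append per entry) with a recursive quicksort-style partition: take the first entry's level, filter out its whole group, recurse on the remaining entries.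
import Mathlib
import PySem

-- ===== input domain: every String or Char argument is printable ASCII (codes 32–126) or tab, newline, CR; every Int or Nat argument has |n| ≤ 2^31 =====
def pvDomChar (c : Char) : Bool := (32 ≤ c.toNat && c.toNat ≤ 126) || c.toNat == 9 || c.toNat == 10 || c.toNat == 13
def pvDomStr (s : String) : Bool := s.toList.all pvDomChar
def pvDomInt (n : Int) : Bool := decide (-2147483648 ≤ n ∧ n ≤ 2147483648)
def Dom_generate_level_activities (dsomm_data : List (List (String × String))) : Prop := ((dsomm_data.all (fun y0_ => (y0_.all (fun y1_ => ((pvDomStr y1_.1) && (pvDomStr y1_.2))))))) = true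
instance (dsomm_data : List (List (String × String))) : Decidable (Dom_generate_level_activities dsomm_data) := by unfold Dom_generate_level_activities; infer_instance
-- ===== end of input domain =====

-- B replaces A's incremental dict-grouping loop with a recursive quicksort-style partition
-- (peel the first entry's level, filter out its group, recurse on the rest); alternative
-- decomposition, same first-occurrence key order and stable within-group order.

-- ===== PORT A =====
-- level = int(entry.get("Level", 0)) with only ValueError caught (defaulting to 0);
-- entry.get("Level", 0) yields the int 0 when the key is missing, so int() of it is 0.
def pvLevelA (entry : List (String × String)) : Int :=
  match (PySem.Dict.mk entry).get? "Level" with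
  | none => 0
  | some s =>
    match PySem.Int.ofStr? s with
    | none => 0          -- ValueError caught → default level 0
    | some v => v

def generate_level_activities (dsomm_data : List (List (String × String))) : List (Int × List (List (String × String))) :=
  (dsomm_data.foldl
    (fun d entry =>
      let level := pvLevelA entry
      let d := if d.contains level then d else d.insert level []
      d.modify level [] (fun v => v ++ [entry]))
    (PySem.Dict.empty : PySem.Dict Int (List (List (String × String))))).items

-- ===== PORT B =====
-- B's _level is the same try/except conversion as A's.
def pvLevelB (entry : List (String × String)) : Int :=
  match (PySem.Dict.mk entry).get? "Level" with
  | none => 0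
  | some s =>
    match PySem.Int.ofStr? s with
    | none => 0
    | some v => v

-- go(entries): empty → {}; else partition on the first entry's level and recurse.
def generate_level_activities_alt : List (List (String × String)) → List (Int × List (List (String × String)))
  | [] => []
  | e :: rest =>
    (pvLevelB e, (e :: rest).filter (fun x => pvLevelB x == pvLevelB e)) ::
      generate_level_activities_alt ((e :: rest).filter (fun x => pvLevelB x != pvLevelB e))
termination_by xs => xs.length
decreasing_by
  simp only [List.filter_cons, bne_self_eq_false, List.length_cons]
  exact Nat.lt_succ_of_le (List.length_filter_le _ _)

-- ===== PRECONDITION & SPEC =====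
def Spec_generate_level_activities (dsomm_data : List (List (String × String))) (out : List (Int × List (List (String × String)))) : Prop := out = generate_level_activities_alt dsomm_data
instance (dsomm_data : List (List (String × String))) (out : List (Int × List (List (String × String)))) : Decidable (Spec_generate_level_activities dsomm_data out) := by unfold Spec_generate_level_activities; infer_instance

-- ===== CLAIM (what is proved, stated in full; the proofs are below) =====
def Claim_equal_generate_level_activities : Prop := ∀ (dsomm_data : List (List (String × String))), Dom_generate_level_activities dsomm_data → Spec_generate_level_activities dsomm_data (generate_level_activities dsomm_data)

-- ===== LEMMAS AND PROOFS =====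

theorem pvLevelB_eq : pvLevelB = pvLevelA := rfl

-- common grouped form: distinct levels in first-occurrence order, each with its filtered group
def pvGrp (xs : List (List (String × String))) : List (Int × List (List (String × String))) :=
  (PySem.List.dedup (xs.map pvLevelA)).map
    (fun c => (c, xs.filter (fun e => pvLevelA e == c)))

-- ofList commutes with filter (first-occurrence order is preserved by filter)
theorem pv_ofList_filter (p : Int → Bool) (ys : List Int) :
    PySem.Set.ofList (ys.filter p) = (PySem.Set.ofList ys).filter p := by
  induction ys with
  | nil => rfl
  | cons y ys ih =>
    rw [PySem.Set.ofList_cons, List.filter_cons]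
    by_cases hp : p y
    · rw [hp, if_pos rfl, PySem.Set.ofList_cons, ih]
      simp only [PySem.Set.discard, List.filter_filter, hp, List.filter_cons_of_pos]
      congr 1
      exact List.filter_congr (fun z _ => by rw [Bool.and_comm])
    · rw [Bool.not_eq_true] at hp
      rw [hp, if_neg (by simp), ih]
      simp only [PySem.Set.discard, List.filter_cons, hp, if_neg (by simp : ¬ (false = true)),
        List.filter_filter]
      exact List.filter_congr (fun z _ => by
        by_cases h : z = y
        · simp [h, hp]
        · simp [h])

-- dedup of a cons = head followed by dedup of the tail with the head's value filtered away
theorem pv_dedup_cons (a : Int) (ys : List Int) :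
    PySem.List.dedup (a :: ys) = a :: PySem.List.dedup (ys.filter (fun y => y != a)) := by
  rw [PySem.List.dedup_eq_ofList, PySem.List.dedup_eq_ofList, PySem.Set.ofList_cons,
    pv_ofList_filter]
  rfl

-- B computes the grouped form (functional induction mirroring B's recursion)
theorem pv_alt_eq_grp (xs : List (List (String × String))) :
    generate_level_activities_alt xs = pvGrp xs := by
  induction xs using generate_level_activities_alt.induct with
  | case1 => rw [generate_level_activities_alt]; rfl
  | case2 e rest ih =>
    rw [generate_level_activities_alt, ih, pvGrp, pvGrp, pvLevelB_eq]
    rw [List.map_cons, pv_dedup_cons]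
    rw [List.map_cons]
    congr 1
    have hmf : (rest.map pvLevelA).filter (fun y => y != pvLevelA e)
        = ((e :: rest).filter (fun x => pvLevelA x != pvLevelA e)).map pvLevelA := by
      rw [List.filter_cons_of_neg (by simp), List.filter_map]
      rfl
    rw [hmf]
    refine List.map_congr_left (fun c hc => ?_)
    have hcne : c ≠ pvLevelA e := by
      rw [PySem.List.dedup_eq_ofList] at hc
      have hc' := (PySem.Set.mem_ofList _ _).mp hc
      rcases List.mem_map.mp hc' with ⟨x, hx, hxc⟩
      have := List.of_mem_filter hx
      simpa [← hxc] using this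
    congr 1
    rw [List.filter_cons_of_neg (by simp),
      List.filter_cons_of_neg (by simp [Ne.symm hcne]), List.filter_filter]
    exact (List.filter_congr (fun x _ => by
      by_cases h : pvLevelA x = c
      · simp [h, hcne]
      · simp [h])).symm

-- ===== A-side lemmas (A's fold-with-dict also computes the grouped form) =====

-- re-inserting an absent key and then overwriting it is one insertion
theorem pv_insert_insert_self {ν : Type} (d : PySem.Dict Int ν) (k : Int) (v w : ν)
    (h : d.contains k = false) : (d.insert k v).insert k w = d.insert k w := by
  apply PySem.Dict.ext
  rw [PySem.Dict.items_insert_of_contains _ w (PySem.Dict.contains_insert_self d k v),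
      PySem.Dict.items_insert_of_not_contains _ v h,
      PySem.Dict.items_insert_of_not_contains _ w h]
  have hmem : ∀ p ∈ d.items, (p.1 == k) = false := by
    intro p hp
    have hk : p.1 ∈ d.keys := PySem.Dict.mem_keys_of_mem_items d hp
    rw [PySem.Dict.contains_eq_decide_mem_keys] at h
    simp only [decide_eq_false_iff_not] at h
    exact beq_eq_false_iff_ne.mpr (fun hpk => h (hpk ▸ hk))
  rw [List.map_append]
  congr 1
  · refine List.map_congr_left (fun p hp => ?_) |>.trans (List.map_id _)
    simp [hmem p hp]
  · simp

-- A's guarded step is exactly a modify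
theorem pv_step_eq (d : PySem.Dict Int (List (List (String × String)))) (e : List (String × String)) :
    (let level := pvLevelA e
     let d' := if d.contains level then d else d.insert level []
     d'.modify level [] (fun v => v ++ [e])) = d.modify (pvLevelA e) [] (fun v => v ++ [e]) := by
  set l := pvLevelA e with hl
  by_cases h : d.contains l = true
  · simp [h]
  · have h' : d.contains l = false := by simpa using h
    show ((if d.contains l then d else d.insert l []).modify l [] (fun v => v ++ [e]))
        = d.modify l [] (fun v => v ++ [e])
    rw [if_neg (by simp [h'])]
    show (d.insert l []).insert l (((d.insert l []).getD l []) ++ [e])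
        = d.insert l ((d.getD l []) ++ [e])
    rw [PySem.Dict.getD_insert_self, PySem.Dict.getD_of_not_contains d ([]) h',
      pv_insert_insert_self _ _ _ _ h']

-- an insertion-ordered dict with Nodup keys is its keys paired with their values
theorem pv_items_eq_keys_map {ν : Type} (d : PySem.Dict Int ν) (d0 : ν) (h : d.keys.Nodup) :
    d.items = d.keys.map (fun k => (k, d.getD k d0)) := by
  have : d.keys.map (fun k => (k, d.getD k d0)) = d.items.map (fun p => (p.1, d.getD p.1 d0)) := by
    simp only [PySem.Dict.keys, List.map_map]; rfl
  rw [this]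
  refine (List.map_id d.items).symm.trans (List.map_congr_left (fun p hp => ?_)).symm
  have h2 := PySem.Dict.getD_of_mem_items d (k := p.1) (v := p.2) (by simpa using hp) h d0
  simp [h2]

theorem pv_a_eq_grp (dsomm_data : List (List (String × String))) :
    generate_level_activities dsomm_data = pvGrp dsomm_data := by
  unfold generate_level_activities pvGrp
  have hstep :
      (fun (d : PySem.Dict Int (List (List (String × String)))) entry =>
        let level := pvLevelA entry
        let d' := if d.contains level then d else d.insert level []
        d'.modify level [] (fun v => v ++ [entry]))
      = fun d entry => d.modify (pvLevelA entry) [] (fun v => v ++ [entry]) := by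
    funext d e; exact pv_step_eq d e
  rw [hstep]
  have hfold :
      dsomm_data.foldl (fun d entry => d.modify (pvLevelA entry) [] (fun v => v ++ [entry]))
        PySem.Dict.empty
      = (dsomm_data.map (fun e => (pvLevelA e, e))).foldl
          (fun d p => d.modify p.1 [] (fun v => v ++ [p.2])) PySem.Dict.empty := by
    rw [List.foldl_map]
  rw [hfold]
  set pairs := dsomm_data.map (fun e => (pvLevelA e, e)) with hpairs
  set D := pairs.foldl (fun d p => d.modify p.1 [] (fun v => v ++ [p.2]))
      (PySem.Dict.empty : PySem.Dict Int (List (List (String × String)))) with hD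
  have hkeysnd : D.keys.Nodup := by
    rw [hD]
    exact PySem.Dict.nodup_keys_foldl_modify_key pairs (fun p => p.1) []
      (fun d p v => v ++ [p.2]) _ (by simp)
  have hkeys : D.keys = PySem.List.dedup (dsomm_data.map pvLevelA) := by
    rw [hD, PySem.Dict.keys_foldl_modify_key]
    simp only [PySem.Dict.keys_empty, hpairs, List.map_map]
    rw [PySem.List.dedup_eq_ofList, PySem.Set.ofList_eq_foldl]
    rfl
  have hgetD : ∀ c : Int, D.getD c [] = dsomm_data.filter (fun e => pvLevelA e == c) := by
    intro c
    rw [hD, PySem.Dict.getD_foldl_modify_append, PySem.Dict.getD_empty]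
    simp [hpairs, List.filter_map, Function.comp_def]
  rw [pv_items_eq_keys_map D ([]) hkeysnd, hkeys]
  exact List.map_congr_left (fun c _ => by rw [hgetD c])

-- ===== VERDICT (by name: the statement is the Claim_ definition above) =====
theorem generate_level_activities_spec : Claim_equal_generate_level_activities := by
  intro dsomm_data _
  unfold Spec_generate_level_activities
  rw [pv_a_eq_grp, pv_alt_eq_grp]
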